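-- pv_equiv track=rewrite | github.com/jjungyeun/AlgorithmStudy2021 | SA/2104/5254-2.py | getNthPrefix
-- ===== SOURCE A (Python) =====
-- def getNthPrefix(N, word):
--     suffix_set = set()
--     for i in range(len(word)):
--         suffix_set.add(word[i:])
--     suffix_set = sorted(suffix_set)
--
--     prefixes = []
--     cnt = 1
--     for suf in suffix_set:
--         for i in range(len(suf)):
--             prefix = suf[:i+1]
--             if prefix not in prefixes:
--                 if cnt == N:
--                     return prefix
--                 prefixes.append(prefix)
--                 cnt += 1
-- ===== SOURCE B (Python) =====
-- def getNthPrefix(N, word):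
--     if N < 1:
--         return None
--     suffixes = sorted({word[i:] for i in range(len(word))})
--     prev = ''
--     remaining = N
--     for suf in suffixes:
--         m = min(len(prev), len(suf))
--         l = 0
--         while l < m and prev[l] == suf[l]:
--             l += 1
--         fresh = len(suf) - l
--         if remaining <= fresh:
--             return suf[:l + remaining]
--         remaining -= fresh
--         prev = suf
--     return None
-- ===== Notes on version B (the rewrite author's own statement) =====
-- stated objective: alternative
-- what changed: Replaces A's running dedup list (a linear membership scan of up to n^2 stored prefixes per candidate) by the classic suffix-array counting scheme: sort the distinct suffixes once, skip each suffix's already-seen prefixes via its LCP with the previous suffix arithmetically, and slice the answer out directly.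
import Mathlib
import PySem

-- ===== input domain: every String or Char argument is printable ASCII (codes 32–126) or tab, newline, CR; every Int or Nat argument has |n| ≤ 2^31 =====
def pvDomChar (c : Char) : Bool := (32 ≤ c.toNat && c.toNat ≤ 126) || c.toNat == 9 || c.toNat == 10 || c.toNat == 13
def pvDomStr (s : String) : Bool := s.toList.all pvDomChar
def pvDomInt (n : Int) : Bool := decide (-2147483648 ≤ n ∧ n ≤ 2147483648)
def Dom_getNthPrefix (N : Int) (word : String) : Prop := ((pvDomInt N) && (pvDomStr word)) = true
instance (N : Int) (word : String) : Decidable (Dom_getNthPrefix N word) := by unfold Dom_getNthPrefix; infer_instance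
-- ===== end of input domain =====

-- B replaces A's running dedup list over sorted-suffix prefixes by the classic
-- suffix-array counting scheme: LCP with the previous suffix tells how many prefixes are new.

-- ===== PORT A =====
-- inner 'for i in range(len(suf))' loop; .inl = early 'return prefix', .inr = state (prefixes, cnt) after the loop
def pvInnerA (N : Int) (suf : List Char) (idxs : List Int) (prefixes : List (List Char)) (cnt : Int) :
    List Char ⊕ (List (List Char) × Int) :=
  match idxs with
  | [] => .inr (prefixes, cnt)
  | i :: rest =>
    let pre := PySem.List.slice suf none (some (i + 1))
    if pre ∈ prefixes then pvInnerA N suf rest prefixes cnt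
    else if cnt = N then .inl pre
    else pvInnerA N suf rest (prefixes ++ [pre]) (cnt + 1)

-- outer 'for suf in suffix_set' loop
def pvOuterA (N : Int) (sufs : List (List Char)) (prefixes : List (List Char)) (cnt : Int) :
    Option (List Char) :=
  match sufs with
  | [] => none
  | s :: rest =>
    match pvInnerA N s (PySem.List.pyRange 0 (s.length : Int) 1) prefixes cnt with
    | .inl p => some p
    | .inr (ps, c) => pvOuterA N rest ps c

def getNthPrefix (N : Int) (word : String) : Option String :=
  let cs := word.toList
  let suffixSet : PySem.Set (List Char) :=
    (PySem.List.pyRange 0 (cs.length : Int) 1).foldl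
      (fun st i => PySem.Set.add st (PySem.List.slice cs (some i) none)) PySem.Set.empty
  let sufs := PySem.List.sorted suffixSet (fun x => x) false
  (pvOuterA N sufs [] 1).map String.ofList

-- ===== PORT B =====
-- the 'while l < m and prev[l] == suf[l]: l += 1' loop; for l < m both indexings are in
-- range, so comparing the getElem? values is exactly Python's character comparison
def pvLcpGo (prev suf : List Char) (m : Nat) (l : Nat) : Nat :=
  if h : l < m then
    if prev[l]? = suf[l]? then pvLcpGo prev suf m (l + 1) else l
  else l
termination_by m - l

-- the 'for suf in suffixes' loop of B
def pvLoopB (N : Int) (sufs : List (List Char)) (prev : List Char) (remaining : Int) :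
    Option (List Char) :=
  match sufs with
  | [] => none
  | suf :: rest =>
    let m := min prev.length suf.length
    let l := pvLcpGo prev suf m 0
    let fresh : Int := (suf.length : Int) - (l : Int)
    if remaining ≤ fresh then some (PySem.List.slice suf none (some ((l : Int) + remaining)))
    else pvLoopB N rest suf (remaining - fresh)

def getNthPrefix_alt (N : Int) (word : String) : Option String :=
  if N < 1 then none
  else
    let cs := word.toList
    let suffixes := PySem.List.sorted (PySem.Set.ofList
        ((PySem.List.pyRange 0 (cs.length : Int) 1).map (fun i =>
          PySem.List.slice cs (some i) none))) (fun x => x) false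
    (pvLoopB N suffixes [] N).map String.ofList

-- ===== PRECONDITION & SPEC =====
def Spec_getNthPrefix (N : Int) (word : String) (out : Option String) : Prop := out = getNthPrefix_alt N word
instance (N : Int) (word : String) (out : Option String) : Decidable (Spec_getNthPrefix N word out) := by unfold Spec_getNthPrefix; infer_instance

-- ===== CLAIM (what is proved, stated in full; the proofs are below) =====
def Claim_equal_getNthPrefix : Prop := ∀ (N : Int) (word : String), Dom_getNthPrefix N word → Spec_getNthPrefix N word (getNthPrefix N word)

-- ===== LEMMAS AND PROOFS =====

-- the (nonempty) prefixes of s, in increasing length: [s[:1], …, s[:len(s)]]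
def pvPrefs (s : List Char) : List (List Char) :=
  (List.range s.length).map (fun k => s.take (k + 1))

-- the prefixes of s that are new relative to the seen-list P, in order
def pvEmitOne (P : List (List Char)) (s : List Char) : List (List Char) :=
  (pvPrefs s).filter (fun p => decide (p ∉ P))

-- every prefix A's walk emits, in emission order
def pvEmitAll (sufs : List (List Char)) (P : List (List Char)) : List (List Char) :=
  match sufs with
  | [] => []
  | s :: rest => pvEmitOne P s ++ pvEmitAll rest (P ++ pvEmitOne P s)

-- A's inner loop, abstracted over the candidate-prefix list
def pvProc (N : Int) (cands : List (List Char)) (P : List (List Char)) (cnt : Int) :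
    List Char ⊕ (List (List Char) × Int) :=
  match cands with
  | [] => .inr (P, cnt)
  | c :: rest =>
    if c ∈ P then pvProc N rest P cnt
    else if cnt = N then .inl c
    else pvProc N rest (P ++ [c]) (cnt + 1)

-- P "closes" s: every nonempty prefix of s is already in P
def pvClosed (P : List (List Char)) (s : List Char) : Prop :=
  ∀ q, q <+: s → q ≠ [] → q ∈ P

-- a proper prefix is lexicographically smaller
theorem pv_lex_of_prefix_lt (p q : List Char) (hp : p <+: q) (hl : p.length < q.length) :
    p < q := by
  induction p generalizing q with
  | nil =>
    cases q with
    | nil => simp at hl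
    | cons b q' => exact List.Lex.nil
  | cons a p' ih =>
    cases q with
    | nil => simp at hl
    | cons b q' =>
      rw [List.cons_prefix_cons] at hp
      obtain ⟨rfl, hp'⟩ := hp
      exact List.Lex.cons (ih q' hp' (by simpa using hl))


theorem pvPrefs_pairwise (s : List Char) : (pvPrefs s).Pairwise (· < ·) := by
  unfold pvPrefs
  rw [List.pairwise_map]
  refine List.Pairwise.imp_of_mem ?_ (List.pairwise_lt_range)
  intro j k hj hk hjk
  simp only [List.mem_range] at hj hk
  refine pv_lex_of_prefix_lt _ _ (List.take_prefix_take_left (by omega)) ?_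
  simp only [List.length_take]
  omega

theorem pvPrefs_nodup (s : List Char) : (pvPrefs s).Nodup :=
  (pvPrefs_pairwise s).imp (fun h => LT.lt.ne h)

theorem pv_mem_prefs_iff (s q : List Char) : q ∈ pvPrefs s ↔ q ≠ [] ∧ q <+: s := by
  unfold pvPrefs
  simp only [List.mem_map, List.mem_range]
  constructor
  · rintro ⟨k, hk, rfl⟩
    refine ⟨?_, List.take_prefix _ _⟩
    intro h
    apply_fun List.length at h
    simp only [List.length_take, List.length_nil] at h
    omega
  · rintro ⟨hne, hpre⟩
    have hq := List.prefix_iff_eq_take.mp hpre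
    have hz : q.length ≠ 0 := by simpa [List.length_eq_zero_iff] using hne
    refine ⟨q.length - 1, ?_, ?_⟩
    · have := hpre.length_le; omega
    · rw [Nat.sub_add_cancel (by omega)]
      exact hq.symm

theorem pv_mem_emitOne (P : List (List Char)) (s q : List Char) :
    q ∈ pvEmitOne P s ↔ q ∉ P ∧ q ≠ [] ∧ q <+: s := by
  unfold pvEmitOne
  simp only [List.mem_filter, pv_mem_prefs_iff, decide_eq_true_eq]
  tauto

-- pvProc computes: return the (N-cnt)-th new prefix if it exists, else the advanced state
theorem pvProc_spec (N : Int) (cands : List (List Char)) (h : cands.Nodup) :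
    ∀ (P : List (List Char)) (cnt : Int),
    pvProc N cands P cnt =
      (match (if cnt ≤ N then (cands.filter (fun p => decide (p ∉ P)))[(N - cnt).toNat]? else none) with
       | some c => .inl c
       | none => .inr (P ++ cands.filter (fun p => decide (p ∉ P)),
                       cnt + (cands.filter (fun p => decide (p ∉ P))).length)) := by
  induction cands with
  | nil => intro P cnt; simp [pvProc]
  | cons c rest ih =>
    intro P cnt
    have hrest : rest.Nodup := h.of_cons
    have hcr : c ∉ rest := by simp [List.nodup_cons] at h; exact h.1
    by_cases hc : c ∈ P
    · simp only [pvProc, if_pos hc]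
      rw [ih hrest]
      simp [hc]
    · have hfc : (c :: rest).filter (fun p => decide (p ∉ P)) =
          c :: rest.filter (fun p => decide (p ∉ P)) := by
        simp [hc]
      by_cases hcnt : cnt = N
      · subst hcnt
        simp only [pvProc, if_neg hc]
        rw [hfc]
        simp
      · simp only [pvProc, if_neg hc, if_neg hcnt]
        rw [ih hrest]
        have hfilt : rest.filter (fun p => decide (p ∉ P ++ [c])) =
            rest.filter (fun p => decide (p ∉ P)) := by
          apply List.filter_congr
          intro x hx
          have : x ≠ c := fun he => hcr (he ▸ hx)
          simp [List.mem_append, this]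
        rw [hfilt, hfc]
        by_cases hle : cnt ≤ N
        · have h1 : cnt + 1 ≤ N := lt_of_le_of_ne hle hcnt
          rw [if_pos h1, if_pos hle]
          have hidx : (N - cnt).toNat = (N - (cnt + 1)).toNat + 1 := by omega
          rw [hidx]
          simp only [List.getElem?_cons_succ]
          split
          · rfl
          · simp [List.append_assoc]
            omega
        · have h1 : ¬ cnt + 1 ≤ N := by omega
          rw [if_neg h1, if_neg hle]
          simp [List.append_assoc]
          omega

theorem pvInnerA_eq_proc_aux (N : Int) (suf : List Char) (idxs : List Int) :
    ∀ (P : List (List Char)) (cnt : Int),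
    pvInnerA N suf idxs P cnt =
      pvProc N (idxs.map (fun i => PySem.List.slice suf none (some (i + 1)))) P cnt := by
  induction idxs with
  | nil => intro P cnt; rfl
  | cons i rest ih =>
    intro P cnt
    simp only [pvInnerA, pvProc, List.map_cons, ih]

theorem pvInnerA_eq_proc (N : Int) (suf : List Char) (P : List (List Char)) (cnt : Int) :
    pvInnerA N suf (PySem.List.pyRange 0 (suf.length : Int) 1) P cnt =
      pvProc N (pvPrefs suf) P cnt := by
  rw [pvInnerA_eq_proc_aux]
  congr 1
  rw [PySem.List.pyRange_one]
  simp only [Int.sub_zero, Int.toNat_natCast, List.map_map]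
  unfold pvPrefs
  apply List.map_congr_left
  intro k hk
  simp only [Function.comp_apply, Int.zero_add]
  have hcast : ((k : Int) + 1) = ((k + 1 : Nat) : Int) := by push_cast; ring
  rw [hcast, PySem.List.slice_to_natCast]

theorem pvOuterA_spec (N : Int) (sufs : List (List Char)) :
    ∀ (P : List (List Char)) (cnt : Int),
    pvOuterA N sufs P cnt =
      if cnt ≤ N then (pvEmitAll sufs P)[(N - cnt).toNat]? else none := by
  induction sufs with
  | nil =>
    intro P cnt
    simp [pvOuterA, pvEmitAll]
  | cons s rest ih =>
    intro P cnt
    rw [pvOuterA, pvInnerA_eq_proc, pvProc_spec N _ (pvPrefs_nodup s)]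
    have hem : (pvPrefs s).filter (fun p => decide (p ∉ P)) = pvEmitOne P s := rfl
    rw [hem]
    set em := pvEmitOne P s with hemdef
    rw [pvEmitAll, ← hemdef]
    cases hoe : (if cnt ≤ N then em[(N - cnt).toNat]? else none) with
    | some v =>
      have hle : cnt ≤ N := by
        by_contra hc
        rw [if_neg hc] at hoe; cases hoe
      rw [if_pos hle] at hoe
      have hlt : (N - cnt).toNat < em.length := by
        by_contra hc
        rw [List.getElem?_eq_none_iff.mpr (by omega)] at hoe; cases hoe
      rw [if_pos hle, List.getElem?_append_left hlt, hoe]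
    | none =>
      show pvOuterA N rest (P ++ em) (cnt + em.length) = _
      rw [ih]
      by_cases hle : cnt ≤ N
      · rw [if_pos hle] at hoe
        have hge : em.length ≤ (N - cnt).toNat := by
          by_contra hc
          rw [List.getElem?_eq_none_iff] at hoe; omega
        have h2 : cnt + (em.length : Int) ≤ N := by omega
        rw [if_pos h2, if_pos hle, List.getElem?_append_right (by omega)]
        congr 1
        omega
      · rw [if_neg hle, if_neg (by omega)]



-- sorted with the canonical LinearOrder instances (what the PySem order lemmas are stated for)
def pvSortedG (xs : List (List Char)) : List (List Char) :=
  @PySem.List.sorted (List Char) (List Char) List.instLinearOrder.toLT LinearOrder.toDecidableLT xs (fun x => x) false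

-- instance bridge: the ports' sorted call (core list instances) computes pvSortedG
theorem pv_sorted_inst (xs : List (List Char)) :
    PySem.List.sorted xs (fun x => x) false = pvSortedG xs := by
  have h : (fun a b : List Char => a.decidableLT b)
      = (LinearOrder.toDecidableLT (α := List Char)) := Subsingleton.elim _ _
  show @PySem.List.sorted (List Char) (List Char) List.instLinearOrder.toLT (fun a b => a.decidableLT b) xs (fun x => x) false = _
  rw [pvSortedG, h]

theorem pvSortedG_ofList_pairwise (xs : List (List Char)) :
    (pvSortedG (PySem.Set.ofList xs)).Pairwise (fun a b => a < b) := by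
  unfold pvSortedG
  exact PySem.List.sorted_ofList_pairwise_lt xs

theorem pvSortedG_mem (xs : List (List Char)) (x : List Char) :
    x ∈ pvSortedG xs ↔ x ∈ xs := by
  exact @PySem.List.mem_sorted (List Char) (List Char) List.instLinearOrder.toLT
    LinearOrder.toDecidableLT xs (fun x => x) false x



-- prefixes agree with their extensions position by position
theorem pv_prefix_getElem? (q s : List Char) (h : q <+: s) (i : Nat) (hi : i < q.length) :
    s[i]? = q[i]? := by
  obtain ⟨t, rfl⟩ := h
  rw [List.getElem?_append_left hi]

-- what the while loop computes: a maximal agreement point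
theorem pvLcpGo_spec (prev suf : List Char) (m : Nat) :
    ∀ l, l ≤ m → (∀ i, i < l → prev[i]? = suf[i]?) →
    l ≤ pvLcpGo prev suf m l ∧ pvLcpGo prev suf m l ≤ m ∧
      (∀ i, i < pvLcpGo prev suf m l → prev[i]? = suf[i]?) ∧
      (pvLcpGo prev suf m l = m ∨ prev[pvLcpGo prev suf m l]? ≠ suf[pvLcpGo prev suf m l]?) := by
  intro l
  induction hk : m - l generalizing l with
  | zero =>
    intro hl hagree
    have : ¬ l < m := by omega
    rw [pvLcpGo, dif_neg this]
    exact ⟨le_refl l, hl, hagree, Or.inl (by omega)⟩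
  | succ k ih =>
    intro hl hagree
    have hlm : l < m := by omega
    rw [pvLcpGo, dif_pos hlm]
    by_cases he : prev[l]? = suf[l]?
    · rw [if_pos he]
      have hagree' : ∀ i, i < l + 1 → prev[i]? = suf[i]? := by
        intro i hi
        rcases Nat.lt_succ_iff_lt_or_eq.mp hi with h | rfl
        · exact hagree i h
        · exact he
      obtain ⟨h1, h2, h3, h4⟩ := ih (l + 1) (by omega) (by omega) hagree'
      exact ⟨by omega, h2, h3, h4⟩
    · rw [if_neg he]
      exact ⟨le_refl l, by omega, hagree, Or.inr he⟩

-- a common prefix of prev and suf is no longer than the computed agreement point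
theorem pv_common_le_lcp (prev suf q : List Char)
    (hq1 : q <+: prev) (hq2 : q <+: suf) :
    q.length ≤ pvLcpGo prev suf (min prev.length suf.length) 0 := by
  set m := min prev.length suf.length with hm
  obtain ⟨-, h2, -, h4⟩ := pvLcpGo_spec prev suf m 0 (by omega) (by omega)
  set r := pvLcpGo prev suf m 0 with hr
  by_contra hc
  push Not at hc
  have hrq : r < q.length := hc
  rcases h4 with h4 | h4
  · have := hq1.length_le
    have := hq2.length_le
    omega
  · exact h4 ((pv_prefix_getElem? q prev hq1 r hrq).trans
      (pv_prefix_getElem? q suf hq2 r hrq).symm)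

-- positions below the agreement point really agree: equal takes
theorem pv_lcp_take_eq (prev suf : List Char) (l : Nat)
    (hl : l ≤ pvLcpGo prev suf (min prev.length suf.length) 0) :
    prev.take l = suf.take l := by
  obtain ⟨-, h2, h3, -⟩ := pvLcpGo_spec prev suf (min prev.length suf.length) 0
    (by omega) (by omega)
  apply List.ext_getElem?
  intro i
  by_cases hi : i < l
  · rw [List.getElem?_take_of_lt hi, List.getElem?_take_of_lt hi]
    exact h3 i (by omega)
  · rw [List.getElem?_take_eq_none (by omega), List.getElem?_take_eq_none (by omega)]

-- a string lexicographically between two strings with common prefix q also has prefix q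
theorem pv_prefix_between (q s₀ prev suf : List Char) (h₀ : q <+: s₀) (h₁ : q <+: suf)
    (hle : ¬ prev < s₀) (hlt : prev < suf) : q <+: prev := by
  induction q generalizing s₀ prev suf with
  | nil => exact List.nil_prefix
  | cons c q' ih =>
    cases s₀ with
    | nil => simp at h₀
    | cons a s₀' =>
      rw [List.cons_prefix_cons] at h₀
      obtain ⟨rfl, h₀'⟩ := h₀
      cases suf with
      | nil => simp at h₁
      | cons b suf' =>
        rw [List.cons_prefix_cons] at h₁
        obtain ⟨rfl, h₁'⟩ := h₁
        cases prev with
        | nil => exact absurd List.Lex.nil hle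
        | cons p prev' =>
          cases hlt with
          | rel hpc => exact absurd (List.Lex.rel hpc) hle
          | cons hps =>
            have hle' : ¬ prev' < s₀' := fun hh => hle (List.Lex.cons hh)
            rw [List.cons_prefix_cons]
            exact ⟨rfl, ih s₀' prev' suf' h₀' h₁' hle' hps⟩

-- under the seen-list invariants, the new prefixes of suf are exactly those past the lcp
theorem pvEmitOne_eq_drop (P : List (List Char)) (suf : List Char) (l : Nat)
    (hl_le : l ≤ suf.length)
    (hin : ∀ q, q ≠ [] → q <+: suf → q.length ≤ l → q ∈ P)
    (hout : ∀ q, q <+: suf → l < q.length → q ∉ P) :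
    pvEmitOne P suf = (pvPrefs suf).drop l := by
  unfold pvEmitOne
  conv_lhs => rw [← List.take_append_drop l (pvPrefs suf)]
  rw [List.filter_append]
  have htake : (pvPrefs suf).take l = (List.range l).map (fun k => suf.take (k + 1)) := by
    unfold pvPrefs
    rw [← List.map_take, List.take_range, Nat.min_eq_left hl_le]
  have hdrop : (pvPrefs suf).drop l = (List.range' l (suf.length - l)).map
      (fun k => suf.take (k + 1)) := by
    unfold pvPrefs
    rw [← List.map_drop]
    congr 1
    simp [List.range_eq_range', List.drop_range']
  have h1 : ((pvPrefs suf).take l).filter (fun p => decide (p ∉ P)) = [] := by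
    rw [List.filter_eq_nil_iff]
    intro y hy
    rw [htake, List.mem_map] at hy
    obtain ⟨k, hk, rfl⟩ := hy
    rw [List.mem_range] at hk
    simp only [decide_eq_true_eq, not_not]
    refine hin _ ?_ (List.take_prefix _ _) ?_
    · intro h
      apply_fun List.length at h
      simp only [List.length_take, List.length_nil] at h
      omega
    · simp only [List.length_take]
      omega
  have h2 : ((pvPrefs suf).drop l).filter (fun p => decide (p ∉ P)) = (pvPrefs suf).drop l := by
    rw [List.filter_eq_self]
    intro y hy
    rw [hdrop, List.mem_map] at hy
    obtain ⟨k, hk, rfl⟩ := hy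
    have hk' := List.mem_range'_1.mp hk
    simp only [decide_eq_true_eq]
    refine hout _ (List.take_prefix _ _) ?_
    simp only [List.length_take]
    omega
  rw [h1, h2, List.nil_append]

-- B's loop returns the (r-1)-st entry of A's remaining emission list
theorem pvLoopB_spec (N : Int) (sufs : List (List Char)) :
    ∀ (P : List (List Char)) (prev : List Char) (r : Int), 1 ≤ r →
    pvClosed P prev →
    (∀ p ∈ P, p ≠ [] ∧ ∃ s₀, p <+: s₀ ∧ ¬ prev < s₀) →
    sufs.Pairwise (· < ·) →
    (∀ t ∈ sufs, prev < t) →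
    pvLoopB N sufs prev r = (pvEmitAll sufs P)[(r - 1).toNat]? := by
  induction sufs with
  | nil => intro P prev r hr _ _ _ _; simp [pvLoopB, pvEmitAll]
  | cons suf rest ih =>
    intro P prev r hr hclosed hP hsort hlt
    rw [List.pairwise_cons] at hsort
    obtain ⟨hsuf_rest, hrest_sort⟩ := hsort
    have hps : prev < suf := hlt suf (by simp)
    set l := pvLcpGo prev suf (min prev.length suf.length) 0 with hl
    obtain ⟨-, hlm, -, -⟩ := pvLcpGo_spec prev suf (min prev.length suf.length) 0
      (by omega) (by omega)
    have hl_le : l ≤ suf.length := by omega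
    have hl_lep : l ≤ prev.length := by omega
    -- the invariant hypotheses of pvEmitOne_eq_drop
    have hin : ∀ q, q ≠ [] → q <+: suf → q.length ≤ l → q ∈ P := by
      intro q hne hpre hlen
      have hqtake := List.prefix_iff_eq_take.mp hpre
      have hqprev : q <+: prev := by
        have h1 : q <+: suf.take l := by
          rw [List.prefix_iff_eq_take, List.take_take, Nat.min_eq_left hlen]
          exact hqtake
        rw [← pv_lcp_take_eq prev suf l (by omega)] at h1
        exact h1.trans (List.take_prefix _ _)
      exact hclosed q hqprev hne
    have hout : ∀ q, q <+: suf → l < q.length → q ∉ P := by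
      intro q hpre hlen hqP
      obtain ⟨hne, s₀, hqs₀, hs₀⟩ := hP q hqP
      have hqprev : q <+: prev := pv_prefix_between q s₀ prev suf hqs₀ hpre hs₀ hps
      have := pv_common_le_lcp prev suf q hqprev hpre
      omega
    have hemit : pvEmitOne P suf = (pvPrefs suf).drop l :=
      pvEmitOne_eq_drop P suf l hl_le hin hout
    have hemlen : (pvEmitOne P suf).length = suf.length - l := by
      rw [hemit, List.length_drop]
      unfold pvPrefs
      rw [List.length_map, List.length_range]
    show (if r ≤ (suf.length : Int) - (l : Int) then
        some (PySem.List.slice suf none (some ((l : Int) + r)))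
      else pvLoopB N rest suf (r - ((suf.length : Int) - (l : Int)))) = _
    rw [show pvEmitAll (suf :: rest) P = pvEmitOne P suf ++ pvEmitAll rest (P ++ pvEmitOne P suf)
      from rfl]
    by_cases hbr : r ≤ (suf.length : Int) - (l : Int)
    · rw [if_pos hbr, List.getElem?_append_left (by omega)]
      rw [hemit, List.getElem?_drop]
      have hidx : l + (r - 1).toNat < suf.length := by omega
      rw [show (pvPrefs suf)[l + (r - 1).toNat]? = some (suf.take (l + (r - 1).toNat + 1)) by
        unfold pvPrefs
        rw [List.getElem?_map, List.getElem?_range hidx]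
        rfl]
      have hcast : (l : Int) + r = ((l + (r - 1).toNat + 1 : Nat) : Int) := by omega
      rw [hcast, PySem.List.slice_to_natCast]
    · rw [if_neg hbr]
      have hfresh_pos : (1 : Int) ≤ r - ((suf.length : Int) - (l : Int)) := by omega
      rw [ih (P ++ pvEmitOne P suf) suf _ hfresh_pos ?_ ?_ hrest_sort hsuf_rest]
      · rw [List.getElem?_append_right (by omega)]
        congr 1
        omega
      · -- pvClosed (P ++ em) suf
        intro q hq hne
        rw [List.mem_append]
        by_cases hlen : q.length ≤ l
        · exact Or.inl (hin q hne hq hlen)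
        · refine Or.inr ((pv_mem_emitOne P suf q).mpr ⟨?_, hne, hq⟩)
          intro hqP
          exact hout q hq (by omega) hqP
      · -- the seen-list invariant for suf
        intro p hp
        rw [List.mem_append] at hp
        cases hp with
        | inl hp =>
          obtain ⟨hne, s₀, hqs₀, hs₀⟩ := hP p hp
          refine ⟨hne, s₀, hqs₀, fun hc => hs₀ (lt_trans hps hc)⟩
        | inr hp =>
          rw [pv_mem_emitOne] at hp
          exact ⟨hp.2.1, suf, hp.2.2, lt_irrefl suf⟩


-- ===== VERDICT (by name: the statement is the Claim_ definition above) =====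
theorem getNthPrefix_spec : Claim_equal_getNthPrefix := by
  unfold Claim_equal_getNthPrefix
  intro N word _
  unfold Spec_getNthPrefix getNthPrefix getNthPrefix_alt
  simp only []
  set cs := word.toList with hcs
  set n := cs.length with hn
  have hmap : (PySem.List.pyRange 0 (n : Int) 1).map
      (fun i => PySem.List.slice cs (some i) none)
      = (List.range n).map (fun k => cs.drop k) := by
    rw [PySem.List.pyRange_one]
    simp only [Int.sub_zero, Int.toNat_natCast, List.map_map]
    apply List.map_congr_left
    intro k _
    simp only [Function.comp_apply, Int.zero_add, PySem.List.slice_from_natCast]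
  have hsufset : ((PySem.List.pyRange 0 (n : Int) 1).foldl
      (fun st i => PySem.Set.add st (PySem.List.slice cs (some i) none)) PySem.Set.empty)
      = PySem.Set.ofList ((List.range n).map (fun k => cs.drop k)) := by
    rw [PySem.Set.ofList_eq_foldl, ← hmap, List.foldl_map]
    rfl
  rw [hsufset, hmap, pv_sorted_inst]
  set sufL := (List.range n).map (fun k => cs.drop k) with hsufL
  set S := pvSortedG (PySem.Set.ofList sufL) with hS
  have hSpair : S.Pairwise (fun a b => a < b) := pvSortedG_ofList_pairwise sufL
  have hSmem : ∀ x, x ∈ S ↔ x ∈ sufL := fun x =>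
    (pvSortedG_mem _ x).trans (PySem.Set.mem_ofList _ x)
  rw [pvOuterA_spec]
  by_cases h1 : (1 : Int) ≤ N
  · have hcl : pvClosed [] [] := by
      intro q hq hne
      rw [List.prefix_nil] at hq
      exact absurd hq hne
    have hPinv : ∀ p ∈ ([] : List (List Char)), p ≠ [] ∧ ∃ s₀, p <+: s₀ ∧ ¬ ([] : List Char) < s₀ := by
      simp
    have hltS : ∀ t ∈ S, ([] : List Char) < t := by
      intro t ht
      rw [hSmem, hsufL] at ht
      simp only [List.mem_map, List.mem_range] at ht
      obtain ⟨k, hk, rfl⟩ := ht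
      cases hdk : cs.drop k with
      | nil =>
        exfalso
        apply_fun List.length at hdk
        simp only [List.length_drop, List.length_nil] at hdk
        omega
      | cons c t' => exact List.Lex.nil
    rw [if_pos h1, if_neg (by omega), pvLoopB_spec N S [] [] N h1 hcl hPinv hSpair hltS]
  · rw [if_neg h1, if_pos (by omega)]
    rfl
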